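-- pv_equiv track=rewrite | github.com/HaiderMalikk/LeetCode | Other Problems/findbalancedindex.py | findbalancedindex
-- ===== SOURCE A (Python) =====
-- def findbalancedindex(arr): # returns the first index where the same amount even numbers at left and odd numbers at right
--     for i in range(len(arr)): # loop through the array n times where n is the length of the array this makes sure we check the left and right side of the array at each element
--         left = arr[:i] # the left side of the array if from the start to before the current index (here i is discluded)
--         right = arr[i+1:] # the right side of the array if from the end to the current index + 1 this +1 discards the current index making it the middle, here i is included so we need i + 1
--         # all left and right arrays are with reference to the current index (middle)
--
--         eveninleft = list(filter(lambda x: x % 2 == 0, left))  # filter out even numbers from the left side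
--         oddinright = list(filter(lambda x: x % 2 != 0, right))  # filter out odd numbers from the right side
--
--         if len(eveninleft) == len(oddinright): # if the number of even numbers in the left side is equal to the number of odd numbers in the right side
--             return i # return the current index which is the middle point of the array
--
--     return None # if no such index is found return None
-- ===== SOURCE B (Python) =====
-- def findbalancedindex(arr):
--     # single pass: maintain even-count of the processed prefix and odd-count of the remaining suffix
--     evenleft = 0
--     oddright = sum(1 for x in arr if x % 2 != 0)
--     for i, x in enumerate(arr):
--         if x % 2 != 0:
--             oddright -= 1
--         if evenleft == oddright:
--             return i
--         if x % 2 == 0: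
--             evenleft += 1
--     return None
-- ===== Notes on version B (the rewrite author's own statement) =====
-- stated objective: faster
-- what changed: Replaces the per-index slicing and refiltering (quadratic) with a single pass that maintains the even-count of the prefix and the odd-count of the suffix.
import Mathlib
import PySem

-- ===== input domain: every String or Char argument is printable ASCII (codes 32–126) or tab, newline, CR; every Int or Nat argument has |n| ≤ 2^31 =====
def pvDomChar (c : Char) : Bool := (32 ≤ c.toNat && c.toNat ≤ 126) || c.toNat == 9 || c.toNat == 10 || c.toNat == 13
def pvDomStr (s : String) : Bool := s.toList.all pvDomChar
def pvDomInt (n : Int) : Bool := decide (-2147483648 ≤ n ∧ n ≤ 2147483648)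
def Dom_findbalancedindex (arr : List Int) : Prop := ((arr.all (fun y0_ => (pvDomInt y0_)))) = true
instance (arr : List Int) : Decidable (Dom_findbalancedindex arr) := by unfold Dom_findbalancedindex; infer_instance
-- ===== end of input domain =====

-- B replaces A's per-index slicing and refiltering with a single pass that maintains the
-- even-count of the processed prefix and the odd-count of the remaining suffix.

-- ===== PORT A =====
-- the 'for i in range(len(arr))' loop of A, recursing over the list of indices
def pvALoop (arr : List Int) : List Int → Option Int
  | [] => none
  | i :: is =>
    let left := PySem.List.slice arr none (some i)
    let right := PySem.List.slice arr (some (i + 1)) none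
    let eveninleft := left.filter (fun x => PySem.Int.mod x 2 == 0)
    let oddinright := right.filter (fun x => PySem.Int.mod x 2 != 0)
    if eveninleft.length = oddinright.length then some i else pvALoop arr is

def findbalancedindex (arr : List Int) : Option Int :=
  pvALoop arr (PySem.List.pyRange 0 (arr.length : Int) 1)

-- ===== PORT B =====
-- the enumerate loop of B: i = current index, el = evenleft, orr = oddright
def pvBLoop : List Int → Int → Int → Int → Option Int
  | [], _, _, _ => none
  | x :: rest, i, el, orr =>
    let orr' := if PySem.Int.mod x 2 != 0 then orr - 1 else orr
    if el = orr' then some i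
    else pvBLoop rest (i + 1) (if PySem.Int.mod x 2 == 0 then el + 1 else el) orr'

def findbalancedindex_alt (arr : List Int) : Option Int :=
  pvBLoop arr 0 0 ((arr.filter (fun x => PySem.Int.mod x 2 != 0)).length : Int)

-- ===== PRECONDITION & SPEC =====
def Spec_findbalancedindex (arr : List Int) (out : Option Int) : Prop := out = findbalancedindex_alt arr
instance (arr : List Int) (out : Option Int) : Decidable (Spec_findbalancedindex arr out) := by unfold Spec_findbalancedindex; infer_instance

-- ===== CLAIM (what is proved, stated in full; the proofs are below) =====
def Claim_equal_findbalancedindex : Prop := ∀ (arr : List Int), Dom_findbalancedindex arr → Spec_findbalancedindex arr (findbalancedindex arr)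

-- ===== LEMMAS AND PROOFS =====

-- invariant of the two loops: after processing 'pre', A's remaining index loop over
-- 'pre ++ rest' agrees with B's loop over 'rest' carrying the running counters
theorem pv_main : ∀ (rest pre : List Int),
    pvALoop (pre ++ rest)
      (PySem.List.pyRange (pre.length : Int) ((pre.length : Int) + (rest.length : Int)) 1)
    = pvBLoop rest (pre.length : Int)
        ((pre.filter (fun x => PySem.Int.mod x 2 == 0)).length : Int)
        ((rest.filter (fun x => PySem.Int.mod x 2 != 0)).length : Int) := by
  have hm : ∀ a : Int, PySem.Int.mod a 2 = a % 2 :=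
    fun a => PySem.Int.mod_eq_emod_of_pos (by norm_num)
  intro rest
  induction rest with
  | nil =>
    intro pre
    rw [show ((pre.length : Int) + (([] : List Int).length : Int)) = (pre.length : Int) by simp,
        PySem.List.pyRange_one_eq_nil (le_refl _)]
    rfl
  | cons x rs ih =>
    intro pre
    have hlt : (pre.length : Int) < (pre.length : Int) + (((x :: rs) : List Int).length : Int) := by
      have : 0 < (x :: rs).length := by simp
      omega
    rw [PySem.List.pyRange_one_cons hlt]
    have hleft : PySem.List.slice (pre ++ x :: rs) none (some (pre.length : Int)) = pre := by
      rw [PySem.List.slice_to _ (by omega)]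
      simp
    have hright : PySem.List.slice (pre ++ x :: rs) (some ((pre.length : Int) + 1)) none = rs := by
      rw [PySem.List.slice_from _ (by omega)]
      rw [show ((pre.length : Int) + 1).toNat = pre.length + 1 by omega,
          show pre ++ x :: rs = (pre ++ [x]) ++ rs by simp,
          show pre.length + 1 = (pre ++ [x]).length by simp]
      exact List.drop_left
    have ihx := ih (pre ++ [x])
    rw [show (pre ++ [x]) ++ rs = pre ++ x :: rs by simp] at ihx
    simp only [List.length_append, List.length_cons, List.length_nil, List.length_singleton,
      List.filter_append, List.filter_cons, List.filter_nil, hm, Nat.add_zero] at ihx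
    simp only [pvALoop, pvBLoop, hleft, hright, hm]
    push_cast at ihx
    cases hB : ((x % 2 : Int) == 0) with
    | true =>
      have hO : ((x % 2 : Int) != 0) = false := by simp_all
      simp only [hB, hO, List.filter_cons, Bool.false_eq_true, if_true, if_false,
        List.length_singleton, List.length_nil, Nat.add_zero] at ihx ⊢
      by_cases hc : (List.filter (fun x => (x % 2 : Int) == 0) pre).length
          = (List.filter (fun x => (x % 2 : Int) != 0) rs).length
      · have hc' : ((List.filter (fun x => (x % 2 : Int) == 0) pre).length : Int)
            = ((List.filter (fun x => (x % 2 : Int) != 0) rs).length : Int) := by exact_mod_cast hc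
        simp [hc, hc']
      · have hc' : ¬ ((List.filter (fun x => (x % 2 : Int) == 0) pre).length : Int)
            = ((List.filter (fun x => (x % 2 : Int) != 0) rs).length : Int) := by
          exact_mod_cast hc
        simp only [hc, hc', if_false, ite_false]
        norm_num at ihx
        convert ihx using 3 <;> push_cast [List.length_cons] <;> ring
    | false =>
      have hO : ((x % 2 : Int) != 0) = true := by simp_all
      simp only [hB, hO, List.filter_cons, Bool.false_eq_true, if_true, if_false,
        ite_false, ite_true, List.length_cons, List.length_nil, Nat.add_zero] at ihx ⊢
      rw [show ((((List.filter (fun x => (x % 2 : Int) != 0) rs).length + 1 : Nat) : Int) - 1)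
          = ((List.filter (fun x => (x % 2 : Int) != 0) rs).length : Int) by push_cast; ring]
      by_cases hc : (List.filter (fun x => (x % 2 : Int) == 0) pre).length
          = (List.filter (fun x => (x % 2 : Int) != 0) rs).length
      · have hc' : ((List.filter (fun x => (x % 2 : Int) == 0) pre).length : Int)
            = ((List.filter (fun x => (x % 2 : Int) != 0) rs).length : Int) := by exact_mod_cast hc
        simp [hc, hc']
      · have hc' : ¬ ((List.filter (fun x => (x % 2 : Int) == 0) pre).length : Int)
            = ((List.filter (fun x => (x % 2 : Int) != 0) rs).length : Int) := by
          exact_mod_cast hc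
        simp only [hc, hc', if_false, ite_false]
        norm_num at ihx
        convert ihx using 3 <;> push_cast [List.length_cons] <;> ring

-- ===== VERDICT (by name: the statement is the Claim_ definition above) =====
theorem findbalancedindex_spec : Claim_equal_findbalancedindex := by
  intro arr _
  show findbalancedindex arr = findbalancedindex_alt arr
  have h := pv_main arr []
  simpa [findbalancedindex, findbalancedindex_alt] using h
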